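-- pv_equiv track=rewrite | github.com/TwoWells/Catenary | scripts/constrained_bash.py | _mask_quotes
-- ===== SOURCE A (Python) =====
-- def _mask_quotes(s):
--     """Replace quoted content (including delimiters) with spaces.
--
--     This preserves string length and character positions so that regex
--     matches on the masked string can be mapped back to the original.
--     Prevents operators like && || ; | inside quoted arguments (e.g. awk
--     patterns) from being treated as shell operators.
--     """
--     out = list(s)
--     i = 0
--     n = len(s)
--     while i < n:
--         if s[i] == "'":
--             j = s.find("'", i + 1)
--             if j == -1:
--                 j = n - 1
--             for k in range(i, j + 1):
--                 out[k] = ' '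
--             i = j + 1
--         elif s[i] == '"':
--             j = i + 1
--             while j < n and s[j] != '"':
--                 if s[j] == '\\' and j + 1 < n:
--                     j += 1
--                 j += 1
--             for k in range(i, min(j + 1, n)):
--                 out[k] = ' '
--             i = j + 1
--         else:
--             i += 1
--     return ''.join(out)
-- ===== SOURCE B (Python) =====
-- def _mask_quotes(s):
--     """Replace quoted content (including delimiters) with spaces.
--
--     Single-pass finite state machine: mode NORMAL / SINGLE / DOUBLE.
--     """
--     NORMAL, SINGLE, DOUBLE = 0, 1, 2
--     mode = NORMAL
--     res = []
--     it = iter(s)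
--     for c in it:
--         if mode == NORMAL:
--             if c == "'":
--                 res.append(' ')
--                 mode = SINGLE
--             elif c == '"':
--                 res.append(' ')
--                 mode = DOUBLE
--             else:
--                 res.append(c)
--         elif mode == SINGLE:
--             res.append(' ')
--             if c == "'":
--                 mode = NORMAL
--         else:  # DOUBLE
--             res.append(' ')
--             if c == '"':
--                 mode = NORMAL
--             elif c == '\\':
--                 nxt = next(it, None)
--                 if nxt is not None:
--                     res.append(' ')
--     return ''.join(res)
-- ===== Notes on version B (the rewrite author's own statement) =====
-- stated objective: alternative
-- what changed: A mutates a copy of the string by scanning with indices (str.find for single quotes, an inner index while-loop for double quotes) and overwriting index ranges with spaces; B is a single forward pass finite state machine (normal / in-single / in-double modes, consuming the escaped character after a backslash in double quotes) that emits the output character by character.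
import Mathlib
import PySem

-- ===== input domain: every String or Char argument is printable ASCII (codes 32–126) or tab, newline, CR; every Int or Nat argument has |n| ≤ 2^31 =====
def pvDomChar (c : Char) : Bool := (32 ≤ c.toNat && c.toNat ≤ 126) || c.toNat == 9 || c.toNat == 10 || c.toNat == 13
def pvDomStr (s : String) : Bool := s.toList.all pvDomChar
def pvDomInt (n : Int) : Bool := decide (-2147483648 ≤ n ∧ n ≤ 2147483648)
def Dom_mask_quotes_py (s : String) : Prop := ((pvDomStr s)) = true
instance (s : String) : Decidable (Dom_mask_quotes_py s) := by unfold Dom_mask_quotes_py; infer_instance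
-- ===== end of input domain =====

-- B replaces A's index-and-find scanning loop with a single-pass three-mode state machine; objective: alternative decomposition (same linear cost).

-- ===== PORT A =====
-- for k in range(a, b): out[k] = ' '
def maskA_fill (out : List Char) (a b : Int) : List Char :=
  (PySem.List.pyRange a b 1).foldl (fun o k => PySem.List.pySetD o k ' ') out

-- j = s.find("'", i + 1); if j == -1: j = n - 1
def maskAJ (s : List Char) (i : Nat) : Int :=
  let j0 : Int := PySem.Chars.findFrom s ['\''] ((i : Int) + 1) none
  if j0 = -1 then (s.length : Int) - 1 else j0

theorem maskAJ_ge (s : List Char) (i : Nat) (h : i < s.length) : i < (maskAJ s i + 1).toNat := by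
  by_cases hneg : PySem.Chars.findFrom s ['\''] ((i : Int) + 1) none = -1
  · simp only [maskAJ]; rw [if_pos hneg]; omega
  · simp only [maskAJ]
    have hk : i + 1 ≤ s.length := h
    have hcast : ((i : Int) + 1) = ((i + 1 : Nat) : Int) := by push_cast; ring
    rw [hcast] at hneg ⊢
    rw [PySem.Chars.findFrom_natCast s ['\''] (i + 1) hk] at hneg ⊢
    have hf := PySem.Chars.neg_one_le_find (s.drop (i + 1)) ['\'']
    by_cases hfind : PySem.Chars.find (s.drop (i + 1)) ['\''] = -1
    · rw [if_pos hfind] at hneg; exact absurd rfl hneg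
    · rw [if_neg hfind] at hneg ⊢
      rw [if_neg hneg]; omega

theorem maskA_dscan_dec1 (s : List Char) (j : Nat) (h : j < s.length) :
    s.length - (j + 1) < s.length - j := by omega

theorem maskA_dscan_dec2 (s : List Char) (j : Nat) (h : j < s.length) :
    s.length - (j + 2) < s.length - j := by omega

-- inner while loop of the double-quote branch: j = i+1; while j < n and s[j] != '"': …
def maskA_dscan (s : List Char) (j : Nat) : Nat :=
  if _h : j < s.length then
    if s.getD j ' ' ≠ '"' then
      if s.getD j ' ' = '\\' ∧ j + 1 < s.length then maskA_dscan s (j + 2)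
      else maskA_dscan s (j + 1)
    else j
  else j
termination_by s.length - j
decreasing_by
  · exact maskA_dscan_dec2 s j _h
  · exact maskA_dscan_dec1 s j _h

theorem maskA_dscan_ge (s : List Char) (j : Nat) : j ≤ maskA_dscan s j := by
  fun_induction maskA_dscan s j <;> omega

theorem maskA_loop_dec1 (s : List Char) (i : Nat) (h : i < s.length) :
    s.length - (maskAJ s i + 1).toNat < s.length - i := by
  have := maskAJ_ge s i h; omega

theorem maskA_loop_dec2 (s : List Char) (i : Nat) (h : i < s.length) :
    s.length - (maskA_dscan s (i + 1) + 1) < s.length - i := by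
  have := maskA_dscan_ge s (i + 1); omega

theorem maskA_loop_dec3 (s : List Char) (i : Nat) (h : i < s.length) :
    s.length - (i + 1) < s.length - i := by omega

def maskA_loop (s out : List Char) (i : Nat) : List Char :=
  if _h : i < s.length then
    if s.getD i ' ' = '\'' then
      maskA_loop s (maskA_fill out (i : Int) (maskAJ s i + 1)) (maskAJ s i + 1).toNat
    else if s.getD i ' ' = '"' then
      maskA_loop s (maskA_fill out (i : Int) (min ((maskA_dscan s (i + 1) : Int) + 1) (s.length : Int))) (maskA_dscan s (i + 1) + 1)
    else maskA_loop s out (i + 1)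
  else out
termination_by s.length - i
decreasing_by
  · exact maskA_loop_dec1 s i _h
  · exact maskA_loop_dec2 s i _h
  · exact maskA_loop_dec3 s i _h

def mask_quotes_py (s : String) : String := String.mk (maskA_loop s.toList s.toList 0)

-- ===== PORT B =====
-- single-pass FSM over the characters: modes normal / in-single / in-double
-- one structurally recursive pass; mode 0 = normal, 1 = in-single, 2 = in-double
def fsmRun : List Char → Nat → List Char
  | [], _ => []
  | c :: r, mode =>
    if mode = 0 then
      if c = '\'' then ' ' :: fsmRun r 1
      else if c = '"' then ' ' :: fsmRun r 2
      else c :: fsmRun r 0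
    else if mode = 1 then
      ' ' :: (if c = '\'' then fsmRun r 0 else fsmRun r 1)
    else
      if c = '"' then ' ' :: fsmRun r 0
      else if c = '\\' then
        match r with
        | [] => [' ']
        | _ :: r' => ' ' :: ' ' :: fsmRun r' 2
      else ' ' :: fsmRun r 2

def mask_quotes_py_alt (s : String) : String := String.mk (fsmRun s.toList 0)

-- ===== PRECONDITION & SPEC =====
def Spec_mask_quotes_py (s : String) (out : String) : Prop := out = mask_quotes_py_alt s
instance (s : String) (out : String) : Decidable (Spec_mask_quotes_py s out) := by unfold Spec_mask_quotes_py; infer_instance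

-- ===== CLAIM (what is proved, stated in full; the proofs are below) =====
def Claim_equal_mask_quotes_py : Prop := ∀ (s : String), Dom_mask_quotes_py s → Spec_mask_quotes_py s (mask_quotes_py s)

-- ===== LEMMAS AND PROOFS =====

-- proof-side names for the three modes of fsmRun
def fsmN (t : List Char) : List Char := fsmRun t 0
def fsmS (t : List Char) : List Char := fsmRun t 1
def fsmD (t : List Char) : List Char := fsmRun t 2

theorem fsmN_nil : fsmN [] = [] := rfl
theorem fsmN_squote (r : List Char) : fsmN ('\'' :: r) = ' ' :: fsmS r := by
  unfold fsmN fsmS; rw [fsmRun.eq_def]; simp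
theorem fsmN_dquote (r : List Char) : fsmN ('"' :: r) = ' ' :: fsmD r := by
  unfold fsmN fsmD; rw [fsmRun.eq_def]; simp
theorem fsmN_other (c : Char) (r : List Char) (h1 : c ≠ '\'') (h2 : c ≠ '"') :
    fsmN (c :: r) = c :: fsmN r := by
  unfold fsmN; rw [fsmRun.eq_def]; simp [h1, h2]
theorem fsmS_cons (c : Char) (r : List Char) :
    fsmS (c :: r) = ' ' :: (if c = '\'' then fsmN r else fsmS r) := by
  unfold fsmN fsmS; rw [fsmRun.eq_def]; simp
theorem fsmD_quote (r : List Char) : fsmD ('"' :: r) = ' ' :: fsmN r := by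
  unfold fsmN fsmD; rw [fsmRun.eq_def]; simp
theorem fsmD_bs_cons (d : Char) (r : List Char) : fsmD ('\\' :: d :: r) = ' ' :: ' ' :: fsmD r := by
  unfold fsmD; rw [fsmRun.eq_def]; simp
theorem fsmD_bs_nil : fsmD ['\\'] = [' '] := by
  unfold fsmD; rw [fsmRun.eq_def]; simp
theorem fsmD_other (c : Char) (r : List Char) (h1 : c ≠ '"') (h2 : c ≠ '\\') :
    fsmD (c :: r) = ' ' :: fsmD r := by
  unfold fsmD; rw [fsmRun.eq_def]; simp [h1, h2]

theorem singleton_infix_iff (a : Char) (l : List Char) : [a] <:+: l ↔ a ∈ l := by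
  constructor
  · intro h; exact h.subset (List.mem_singleton_self a)
  · intro h
    obtain ⟨p, q, hl⟩ := List.append_of_mem h
    exact ⟨p, q, by simp [hl]⟩

theorem drop_append_exact {α : Type} (x y : List α) (k : Nat) :
    (x ++ y).drop (x.length + k) = y.drop k := by
  rw [List.drop_append, List.drop_of_length_le (Nat.le_add_right _ _), List.nil_append,
    show x.length + k - x.length = k from by omega]

theorem drop_eq_of_drop_eq {out s : List Char} {i k : Nat}
    (h : out.drop i = s.drop i) (hik : i ≤ k) : out.drop k = s.drop k := by
  have h2 := congrArg (List.drop (k - i)) h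
  rw [List.drop_drop, List.drop_drop] at h2
  rwa [show i + (k - i) = k from by omega] at h2

theorem maskA_fill_spec : ∀ (d a b : Nat) (out : List Char), b - a = d → a ≤ b → b ≤ out.length →
    maskA_fill out (a : Int) (b : Int) =
      out.take a ++ List.replicate (b - a) ' ' ++ out.drop b := by
  intro d
  induction d with
  | zero =>
    intro a b out hd hab hb
    have hba : b = a := by omega
    subst hba
    rw [maskA_fill, PySem.List.pyRange_one_eq_nil (le_refl _)]
    simp [List.take_append_drop]
  | succ d ihd =>
    intro a b out hd hab hb
    have hab' : (a : Int) < (b : Int) := by omega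
    rw [maskA_fill, PySem.List.pyRange_one_cons hab']
    simp only [List.foldl_cons, PySem.List.pySetD_natCast]
    have hcast : ((a : Int) + 1) = ((a + 1 : Nat) : Int) := by push_cast; ring
    rw [hcast]
    have hrec := ihd (a + 1) b (out.set a ' ') (by omega) (by omega) (by rw [List.length_set]; omega)
    rw [maskA_fill] at hrec
    rw [hrec]
    have hl : a < out.length := by omega
    have h1 : (out.set a ' ').take (a + 1) = out.take a ++ [' '] := by
      rw [List.take_add_one, List.take_set,
        List.set_eq_of_length_le (by rw [List.length_take]; omega),
        List.getElem?_set_self hl]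
      simp
    have h2 : (out.set a ' ').drop b = out.drop b := by
      rw [List.drop_set, if_pos (by omega)]
    rw [h1, h2, show b - a = (b - (a + 1)) + 1 from by omega, List.replicate_succ]
    simp

theorem fsmS_no (t : List Char) (h : '\'' ∉ t) : fsmS t = List.replicate t.length ' ' := by
  induction t with
  | nil => rfl
  | cons c r ih =>
    have hc : ¬ c = '\'' := by intro hc; exact h (hc ▸ List.mem_cons_self)
    rw [fsmS_cons, if_neg hc, ih (fun hm => h (List.mem_cons_of_mem _ hm)),
      List.length_cons, List.replicate_succ]

theorem fsmS_split (u v : List Char) (h : '\'' ∉ u) :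
    fsmS (u ++ '\'' :: v) = List.replicate (u.length + 1) ' ' ++ fsmN v := by
  induction u with
  | nil => rw [List.nil_append, List.length_nil, fsmS_cons, if_pos rfl]; rfl
  | cons c r ih =>
    have hc : ¬ c = '\'' := by intro hc; exact h (hc ▸ List.mem_cons_self)
    rw [List.cons_append, fsmS_cons, if_neg hc,
      ih (fun hm => h (List.mem_cons_of_mem _ hm))]
    simp [List.replicate_succ]

theorem maskA_dscan_le (s : List Char) (j : Nat) (h : j ≤ s.length) : maskA_dscan s j ≤ s.length := by
  fun_induction maskA_dscan s j <;> omega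

theorem dscan_fsmD (s : List Char) (p : Nat) :
    p ≤ s.length →
    fsmD (s.drop p) =
      List.replicate (min (maskA_dscan s p + 1) s.length - p) ' '
        ++ fsmN (s.drop (maskA_dscan s p + 1)) := by
  fun_induction maskA_dscan s p with
  | case1 p h hq hb ih =>
    intro hp
    obtain ⟨hbs, hlt⟩ := hb
    have hc : s[p] = '\\' := by rw [← List.getD_eq_getElem s ' ' h]; exact hbs
    rw [List.drop_eq_getElem_cons h, hc,
      List.drop_eq_getElem_cons (show p + 1 < s.length from hlt), fsmD_bs_cons]
    rw [ih (by omega)]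
    have hge := maskA_dscan_ge s (p + 2)
    rw [show min (maskA_dscan s (p + 2) + 1) s.length - p
          = (min (maskA_dscan s (p + 2) + 1) s.length - (p + 2)) + 1 + 1 from by omega,
      List.replicate_succ, List.replicate_succ]
    simp
  | case2 p h hq hb ih =>
    intro hp
    by_cases hbs : s.getD p ' ' = '\\'
    · have hn : s.length = p + 1 := by
        rcases Decidable.not_and_iff_not_or_not.mp hb with h1 | h2
        · exact absurd hbs h1
        · omega
      have hd1 : maskA_dscan s (p + 1) = p + 1 := by
        rw [maskA_dscan, dif_neg (by omega)]
      have hc : s[p] = '\\' := by rw [← List.getD_eq_getElem s ' ' h]; exact hbs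
      rw [hd1, List.drop_eq_getElem_cons h, hc,
        List.drop_of_length_le (show s.length ≤ p + 1 from by omega), fsmD_bs_nil,
        List.drop_of_length_le (show s.length ≤ p + 1 + 1 from by omega), fsmN_nil,
        show min (p + 1 + 1) s.length - p = 1 from by omega]
      simp
    · have hc2 : s[p] ≠ '"' := by rw [← List.getD_eq_getElem s ' ' h]; exact hq
      have hc3 : s[p] ≠ '\\' := by rw [← List.getD_eq_getElem s ' ' h]; exact hbs
      rw [List.drop_eq_getElem_cons h, fsmD_other _ _ hc2 hc3, ih (by omega)]
      have hge := maskA_dscan_ge s (p + 1)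
      rw [show min (maskA_dscan s (p + 1) + 1) s.length - p
            = (min (maskA_dscan s (p + 1) + 1) s.length - (p + 1)) + 1 from by omega,
        List.replicate_succ]
      simp
  | case3 p h hq =>
    intro hp
    have hc : s[p] = '"' := by
      rw [← List.getD_eq_getElem s ' ' h]
      exact Decidable.not_not.mp hq
    rw [List.drop_eq_getElem_cons h, hc, fsmD_quote,
      show min (p + 1) s.length - p = 1 from by omega]
    simp
  | case4 p h =>
    intro hp
    rw [List.drop_of_length_le (by omega), List.drop_of_length_le (by omega), fsmN_nil]
    simp [show min (p + 1) s.length - p = 0 from by omega, fsmD, fsmRun]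

theorem maskAJ_notfound (s : List Char) (i : Nat) (hi : i < s.length)
    (h : PySem.Chars.findFrom s ['\''] ((i : Int) + 1) none = -1) :
    maskAJ s i = (s.length : Int) - 1 ∧ '\'' ∉ s.drop (i + 1) := by
  constructor
  · simp only [maskAJ]; rw [if_pos h]
  · have hcast : ((i : Int) + 1) = ((i + 1 : Nat) : Int) := by push_cast; ring
    rw [hcast] at h
    have := (PySem.Chars.findFrom_natCast_eq_neg_one_iff s ['\''] (i + 1) hi).mp h
    intro hm
    exact this ((singleton_infix_iff '\'' (s.drop (i + 1))).mpr hm)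

theorem maskAJ_found (s : List Char) (i : Nat) (hi : i < s.length)
    (h : PySem.Chars.findFrom s ['\''] ((i : Int) + 1) none ≠ -1) :
    0 ≤ PySem.Chars.find (s.drop (i + 1)) ['\''] ∧
      maskAJ s i = ((i + 1 : Nat) : Int) + PySem.Chars.find (s.drop (i + 1)) ['\''] := by
  have hk : i + 1 ≤ s.length := hi
  have hcast : ((i : Int) + 1) = ((i + 1 : Nat) : Int) := by push_cast; ring
  rw [hcast] at h
  rw [PySem.Chars.findFrom_natCast s ['\''] (i + 1) hk] at h
  have hge := PySem.Chars.neg_one_le_find (s.drop (i + 1)) ['\'']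
  by_cases hf : PySem.Chars.find (s.drop (i + 1)) ['\''] = -1
  · rw [if_pos hf] at h; exact absurd rfl h
  · refine ⟨by omega, ?_⟩
    simp only [maskAJ]
    rw [hcast, PySem.Chars.findFrom_natCast s ['\''] (i + 1) hk, if_neg hf, if_neg (by omega)]

theorem fsm_main (s : List Char) : ∀ (fuel i : Nat) (out : List Char), s.length - i ≤ fuel →
    out.length = s.length → out.drop i = s.drop i →
    maskA_loop s out i = out.take i ++ fsmN (s.drop i) := by
  intro fuel
  induction fuel with
  | zero =>
    intro i out hf hlen hsuf
    rw [maskA_loop, dif_neg (by omega)]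
    rw [List.drop_of_length_le (by omega), List.take_of_length_le (by omega), fsmN_nil,
      List.append_nil]
  | succ fuel ih =>
    intro i out hf hlen hsuf
    by_cases hi : i < s.length
    · have hlo : i < out.length := by omega
      rw [List.drop_eq_getElem_cons hlo, List.drop_eq_getElem_cons hi] at hsuf
      injection hsuf with hout_i hsuf1
      rw [maskA_loop, dif_pos hi]
      by_cases hq1 : s.getD i ' ' = '\''
      · rw [if_pos hq1]
        have hci : s[i] = '\'' := by rw [← List.getD_eq_getElem s ' ' hi]; exact hq1
        by_cases hneg : PySem.Chars.findFrom s ['\''] ((i : Int) + 1) none = -1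
        · -- quote not found: mask to the end of the string
          obtain ⟨hj, hno⟩ := maskAJ_notfound s i hi hneg
          have hjc : maskAJ s i + 1 = ((s.length : Nat) : Int) := by rw [hj]; ring
          rw [hjc, Int.toNat_natCast]
          rw [maskA_fill_spec (s.length - i) i s.length out rfl (by omega) (by omega)]
          rw [List.drop_of_length_le (by omega), List.append_nil]
          rw [ih s.length _ (by omega)
            (by simp only [List.length_append, List.length_take, List.length_replicate]; omega)
            (by rw [List.drop_of_length_le
                  (by simp only [List.length_append, List.length_take, List.length_replicate]; omega),
                  List.drop_of_length_le (le_refl _)])]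
          rw [List.take_of_length_le
              (by simp only [List.length_append, List.length_take, List.length_replicate]; omega),
            List.drop_of_length_le (le_refl _), fsmN_nil, List.append_nil]
          rw [List.drop_eq_getElem_cons hi, hci, fsmN_squote, fsmS_no _ hno]
          rw [show s.length - i = (s.length - (i + 1)) + 1 from by omega, List.replicate_succ]
          simp [List.length_drop]
        · -- quote found at index i + 1 + fn
          obtain ⟨h0, hj⟩ := maskAJ_found s i hi hneg
          obtain ⟨hpre, hmin⟩ := PySem.Chars.find_spec h0
          set t := s.drop (i + 1) with ht
          set fn := (PySem.Chars.find t ['\'']).toNat with hfn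
          have htl : t.length = s.length - (i + 1) := by rw [ht, List.length_drop]
          have hfn_lt : fn < t.length := by
            by_contra hcon
            push_neg at hcon
            rw [List.drop_of_length_le hcon, List.prefix_nil] at hpre
            exact absurd hpre (by simp)
          have hdropfn : t.drop fn = '\'' :: t.drop (fn + 1) := by
            have hgc := List.drop_eq_getElem_cons hfn_lt
            obtain ⟨r, hr⟩ := hpre
            rw [hgc, List.singleton_append] at hr
            injection hr with hr1 hr2
            rw [hgc, ← hr1]
          have hu_no : '\'' ∉ t.take fn := by
            intro hmem
            obtain ⟨k, hk, hkeq⟩ := List.getElem_of_mem hmem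
            have hklt : k < fn := by simp [List.length_take] at hk; omega
            apply hmin k hklt
            rw [List.getElem_take] at hkeq
            rw [List.drop_eq_getElem_cons (by omega : k < t.length), hkeq]
            exact ⟨t.drop (k + 1), by rw [List.singleton_append]⟩
          have hsplit : t = t.take fn ++ '\'' :: t.drop (fn + 1) := by
            conv_lhs => rw [← List.take_append_drop fn t]
            rw [hdropfn]
          have hvd : t.drop (fn + 1) = s.drop (i + fn + 2) := by
            rw [ht, List.drop_drop]
            congr 1
            omega
          have hj1 : maskAJ s i + 1 = ((i + fn + 2 : Nat) : Int) := by
            rw [hj, ← Int.toNat_of_nonneg h0, ← hfn]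
            push_cast
            ring
          have hble : i + fn + 2 ≤ s.length := by omega
          rw [hj1, Int.toNat_natCast]
          rw [maskA_fill_spec (fn + 2) i (i + fn + 2) out (by omega) (by omega) (by omega),
            show i + fn + 2 - i = fn + 2 from by omega]
          have hplen : (out.take i ++ List.replicate (fn + 2) ' ').length = i + fn + 2 := by
            simp only [List.length_append, List.length_take, List.length_replicate]; omega
          have hlen2 : ((out.take i ++ List.replicate (fn + 2) ' ') ++ out.drop (i + fn + 2)).length
              = s.length := by
            simp only [List.length_append, List.length_take, List.length_replicate,
              List.length_drop]
            omega
          have hsuf2 : ((out.take i ++ List.replicate (fn + 2) ' ')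
              ++ out.drop (i + fn + 2)).drop (i + fn + 2) = s.drop (i + fn + 2) := by
            conv_lhs => rw [← hplen]
            rw [List.drop_left' rfl, hplen]
            exact drop_eq_of_drop_eq hsuf1 (by omega)
          have hmask_take : ((out.take i ++ List.replicate (fn + 2) ' ')
              ++ out.drop (i + fn + 2)).take (i + fn + 2)
              = out.take i ++ List.replicate (fn + 2) ' ' := by
            conv_lhs => rw [← hplen]
            rw [List.take_left' rfl]
          rw [ih (i + fn + 2) ((out.take i ++ List.replicate (fn + 2) ' ') ++ out.drop (i + fn + 2)) (by omega) hlen2 hsuf2, hmask_take]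
          rw [List.drop_eq_getElem_cons hi, hci, fsmN_squote]
          conv_rhs => rw [← ht, hsplit]
          rw [fsmS_split _ _ hu_no,
            show (t.take fn).length = fn from by rw [List.length_take]; omega, hvd]
          rw [show fn + 2 = (fn + 1) + 1 from rfl, List.replicate_succ (n := fn + 1)]
          simp
      · by_cases hq2 : s.getD i ' ' = '"'
        · rw [if_neg hq1, if_pos hq2]
          have hci : s[i] = '"' := by rw [← List.getD_eq_getElem s ' ' hi]; exact hq2
          set j := maskA_dscan s (i + 1) with hjdef
          have hge : i + 1 ≤ j := maskA_dscan_ge s (i + 1)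
          have hle : j ≤ s.length := maskA_dscan_le s (i + 1) (by omega)
          set m := min (j + 1) s.length with hmdef
          have hmcast : min ((j : Int) + 1) ((s.length : Nat) : Int) = ((m : Nat) : Int) := by
            rw [hmdef]; push_cast; omega
          have him : i + 1 ≤ m := by omega
          rw [hmcast]
          rw [maskA_fill_spec (m - i) i m out rfl (by omega) (by omega)]
          have hplen : (out.take i ++ List.replicate (m - i) ' ').length = m := by
            simp only [List.length_append, List.length_take, List.length_replicate]; omega
          have hlen2 : ((out.take i ++ List.replicate (m - i) ' ') ++ out.drop m).length
              = s.length := by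
            simp only [List.length_append, List.length_take, List.length_replicate,
              List.length_drop]
            omega
          have hsufd : ((out.take i ++ List.replicate (m - i) ' ') ++ out.drop m).drop (j + 1)
              = s.drop (j + 1) := by
            conv_lhs => rw [show j + 1 = (out.take i ++ List.replicate (m - i) ' ').length
              + (j + 1 - m) from by rw [hplen]; omega]
            rw [drop_append_exact, List.drop_drop,
              show m + (j + 1 - m) = j + 1 from by omega]
            exact drop_eq_of_drop_eq hsuf1 (by omega)
          have htake : ((out.take i ++ List.replicate (m - i) ' ') ++ out.drop m).take (j + 1)
              = out.take i ++ List.replicate (m - i) ' ' := by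
            by_cases hcase : j < s.length
            · conv_lhs => rw [show j + 1 = (out.take i ++ List.replicate (m - i) ' ').length
                from by rw [hplen]; omega]
              rw [List.take_left' rfl]
            · rw [List.take_of_length_le (by rw [hlen2]; omega),
                List.drop_of_length_le (by omega), List.append_nil]
          rw [ih (j + 1) ((out.take i ++ List.replicate (m - i) ' ') ++ out.drop m) (by omega) hlen2 hsufd, htake]
          rw [List.drop_eq_getElem_cons hi, hci, fsmN_dquote]
          rw [dscan_fsmD s (i + 1) (by omega), ← hjdef, ← hmdef]
          rw [show m - i = (m - (i + 1)) + 1 from by omega, List.replicate_succ]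
          simp
        · rw [if_neg hq1, if_neg hq2]
          have hc1 : s[i] ≠ '\'' := by rw [← List.getD_eq_getElem s ' ' hi]; exact hq1
          have hc2 : s[i] ≠ '"' := by rw [← List.getD_eq_getElem s ' ' hi]; exact hq2
          rw [ih (i + 1) out (by omega) hlen hsuf1]
          rw [List.take_add_one, List.getElem?_eq_getElem hlo, hout_i]
          rw [List.drop_eq_getElem_cons hi, fsmN_other _ _ hc1 hc2]
          simp
    · rw [maskA_loop, dif_neg hi]
      rw [List.drop_of_length_le (by omega), List.take_of_length_le (by omega), fsmN_nil,
        List.append_nil]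

-- ===== VERDICT (by name: the statement is the Claim_ definition above) =====
theorem mask_quotes_py_spec : Claim_equal_mask_quotes_py := by
  intro s _
  unfold Spec_mask_quotes_py mask_quotes_py mask_quotes_py_alt
  rw [fsm_main s.toList s.toList.length 0 s.toList (by omega) rfl rfl]
  simp [fsmN]
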